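-- pv_equiv track=rewrite | github.com/streampref/streampref | operators/bag.py | bag_intersect
-- ===== SOURCE A (Python) =====
-- def _group_equal_records(record_list):
--     '''
--     Group equals records into a dictionary
--
--     Each entry has the record values as key
--     and a list of equal records
--     '''
--     group_dict = {}
--     for rec in record_list:
--         rec_key = tuple(rec.items())
--         if rec_key in group_dict:
--             group_dict[rec_key].append(rec)
--         else:
--             group_dict[rec_key] = [rec]
--     return group_dict
--
-- def bag_intersect(left_list, right_list):
--     '''
--     Bag intersection between two list
--     '''
--     # Count element of each list
--     left_dict = _group_equal_records(left_list)
--     right_dict = _group_equal_records(right_list)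
--     result_list = []
--     for rec_key in left_dict:
--         if rec_key in right_dict:
--             if len(left_dict[rec_key]) < len(right_dict[rec_key]):
--                 result_list += left_dict[rec_key]
--             else:
--                 result_list += right_dict[rec_key]
--     return result_list
-- ===== SOURCE B (Python) =====
-- def bag_intersect(left_list, right_list):
--     '''
--     Bag intersection between two list
--     '''
--     # Dict-free: repeatedly take the first remaining record's key, emit
--     # min(count in remaining, count in right) copies, drop that key and repeat.
--     result_list = []
--     remaining = left_list
--     while remaining:
--         rec = remaining[0]
--         key = tuple(rec.items())
--         cl = sum(1 for r in remaining if tuple(r.items()) == key)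
--         cr = sum(1 for r in right_list if tuple(r.items()) == key)
--         result_list += [rec] * min(cl, cr)
--         remaining = [r for r in remaining if tuple(r.items()) != key]
--     return result_list
-- ===== Notes on version B (the rewrite author's own statement) =====
-- stated objective: alternative
-- what changed: B uses no dictionaries at all: it repeatedly scans for the first remaining record's key, counts it in both lists by plain scans, emits min copies, and filters that key out of the remaining left records.
import Mathlib
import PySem

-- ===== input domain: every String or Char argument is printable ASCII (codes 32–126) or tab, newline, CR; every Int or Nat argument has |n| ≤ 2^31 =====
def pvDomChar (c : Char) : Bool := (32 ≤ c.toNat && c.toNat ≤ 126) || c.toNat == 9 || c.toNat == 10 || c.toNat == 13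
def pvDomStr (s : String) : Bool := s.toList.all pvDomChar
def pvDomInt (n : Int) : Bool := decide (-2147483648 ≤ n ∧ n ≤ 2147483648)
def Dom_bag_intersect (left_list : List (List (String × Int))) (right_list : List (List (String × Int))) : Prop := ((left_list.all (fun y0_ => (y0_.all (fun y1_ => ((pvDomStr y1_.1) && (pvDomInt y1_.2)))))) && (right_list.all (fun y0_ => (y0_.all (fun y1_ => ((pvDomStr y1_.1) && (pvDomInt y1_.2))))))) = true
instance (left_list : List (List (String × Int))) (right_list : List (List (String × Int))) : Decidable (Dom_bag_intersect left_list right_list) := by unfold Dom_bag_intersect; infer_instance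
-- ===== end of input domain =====

-- B is dict-free: it repeatedly counts the first remaining record's key in both lists by
-- plain scans, emits min copies and filters that key out (objective: alternative algorithm).

-- ===== PORT A =====
-- _group_equal_records: dict keyed by tuple(rec.items()) (= the record itself), value the list of equal records
def pyGroupEqualRecords (record_list : List (List (String × Int))) :
    PySem.Dict (List (String × Int)) (List (List (String × Int))) :=
  record_list.foldl (fun d rec =>
    if d.contains rec then d.insert rec (d.getD rec [] ++ [rec])
    else d.insert rec [rec]) PySem.Dict.empty

def bag_intersect (left_list : List (List (String × Int))) (right_list : List (List (String × Int))) : List (List (String × Int)) :=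
  let left_dict := pyGroupEqualRecords left_list
  let right_dict := pyGroupEqualRecords right_list
  left_dict.keys.foldl (fun result_list rec_key =>
    if right_dict.contains rec_key then
      if (left_dict.getD rec_key []).length < (right_dict.getD rec_key []).length then
        result_list ++ left_dict.getD rec_key []
      else
        result_list ++ right_dict.getD rec_key []
    else result_list) []

-- ===== PORT B =====
-- the while loop of Source B as structural recursion on 'remaining' (each pass removes the head's key)
def bagIntersectLoop : List (List (String × Int)) → List (List (String × Int)) → List (List (String × Int))
  | [], _ => []
  | rec :: tl, right_list =>
      let cl := (rec :: tl).count rec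
      let cr := right_list.count rec
      List.replicate (min cl cr) rec ++ bagIntersectLoop (tl.filter (fun r => r ≠ rec)) right_list
termination_by remaining _ => remaining.length
decreasing_by
  simpa using Nat.lt_succ_of_le ((List.length_filter_le _ _).trans (List.length_attach (l := tl)).le)

def bag_intersect_alt (left_list : List (List (String × Int))) (right_list : List (List (String × Int))) : List (List (String × Int)) :=
  bagIntersectLoop left_list right_list

-- ===== PRECONDITION & SPEC =====
def Spec_bag_intersect (left_list : List (List (String × Int))) (right_list : List (List (String × Int))) (out : List (List (String × Int))) : Prop := out = bag_intersect_alt left_list right_list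
instance (left_list : List (List (String × Int))) (right_list : List (List (String × Int))) (out : List (List (String × Int))) : Decidable (Spec_bag_intersect left_list right_list out) := by unfold Spec_bag_intersect; infer_instance

-- ===== CLAIM (what is proved, stated in full; the proofs are below) =====
def Claim_equal_bag_intersect : Prop := ∀ (left_list : List (List (String × Int))) (right_list : List (List (String × Int))), Dom_bag_intersect left_list right_list → Spec_bag_intersect left_list right_list (bag_intersect left_list right_list)

-- ===== LEMMAS AND PROOFS =====

-- common characterisation: min-count replicates per distinct left key, first-occurrence order
def bagSpec (L R : List (List (String × Int))) : List (List (String × Int)) :=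
  (PySem.Set.ofList L).flatMap (fun k => List.replicate (min (L.count k) (R.count k)) k)

-- ---- A-side lemmas ----
theorem groupStep_eq (d : PySem.Dict (List (String × Int)) (List (List (String × Int)))) (rec : List (String × Int)) :
    (if d.contains rec then d.insert rec (d.getD rec [] ++ [rec]) else d.insert rec [rec])
      = d.insert rec (if d.contains rec then d.getD rec [] ++ [rec] else [rec]) :=
  (apply_ite (d.insert rec ·) _ _ _).symm

theorem getD_group_aux (xs : List (List (String × Int)))
    (d : PySem.Dict (List (String × Int)) (List (List (String × Int)))) (k : List (String × Int)) :
    (xs.foldl (fun d rec =>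
        if d.contains rec then d.insert rec (d.getD rec [] ++ [rec])
        else d.insert rec [rec]) d).getD k []
      = d.getD k [] ++ List.replicate (xs.count k) k := by
  induction xs generalizing d with
  | nil => simp
  | cons x xs ih =>
    rw [List.foldl_cons, ih, groupStep_eq, PySem.Dict.getD_insert]
    by_cases hk : k = x
    · subst hk
      by_cases hc : d.contains k
      · simp [hc, List.replicate_succ, List.append_assoc]
      · simp [hc, PySem.Dict.getD_of_not_contains _ _ (by simpa using hc), List.replicate_succ]
    · simp [hk, Ne.symm hk]

theorem getD_group (xs : List (List (String × Int))) (k : List (String × Int)) :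
    (pyGroupEqualRecords xs).getD k [] = List.replicate (xs.count k) k := by
  simpa using getD_group_aux xs PySem.Dict.empty k

theorem keys_group (xs : List (List (String × Int))) :
    (pyGroupEqualRecords xs).keys = PySem.Set.ofList xs := by
  unfold pyGroupEqualRecords
  simp only [groupStep_eq]
  rw [PySem.Dict.keys_foldl_insert]
  simp [PySem.Set.update_nil_left]

theorem contains_group (xs : List (List (String × Int))) (k : List (String × Int)) :
    (pyGroupEqualRecords xs).contains k = decide (k ∈ xs) := by
  rw [PySem.Dict.contains_eq_decide_mem_keys, keys_group]
  simp [PySem.Set.mem_ofList]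

theorem bag_intersect_eq_bagSpec (L R : List (List (String × Int))) :
    bag_intersect L R = bagSpec L R := by
  simp only [bag_intersect, bagSpec]
  rw [keys_group]
  have h : ∀ (init : List (List (String × Int))),
      (PySem.Set.ofList L).foldl (fun result_list rec_key =>
        if (pyGroupEqualRecords R).contains rec_key then
          if ((pyGroupEqualRecords L).getD rec_key []).length < ((pyGroupEqualRecords R).getD rec_key []).length then
            result_list ++ (pyGroupEqualRecords L).getD rec_key []
          else result_list ++ (pyGroupEqualRecords R).getD rec_key []
        else result_list) init
      = (PySem.Set.ofList L).foldl (fun acc k => acc ++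
          List.replicate (min (L.count k) (R.count k)) k) init := by
    intro init
    refine PySem.List.foldl_congr_mem _ _ _ _ (fun acc k _ => ?_)
    rw [contains_group, getD_group, getD_group]
    by_cases hR : k ∈ R
    · simp only [hR, decide_true, if_true, List.length_replicate]
      by_cases hlt : L.count k < R.count k
      · simp [hlt, Nat.min_eq_left (Nat.le_of_lt hlt)]
      · simp [hlt, Nat.min_eq_right (Nat.le_of_not_lt hlt)]
    · have : R.count k = 0 := List.count_eq_zero.mpr hR
      simp [hR, this]
  rw [h]
  exact PySem.List.foldl_append_eq_flatMap _ _ _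

-- ---- B-side lemmas ----
theorem ofList_filter (p : List (String × Int) → Bool) (xs : List (List (String × Int))) :
    PySem.Set.ofList (xs.filter p) = (PySem.Set.ofList xs).filter p := by
  induction xs with
  | nil => simp [PySem.Set.ofList_nil]
  | cons x xs ih =>
    by_cases hp : p x = true
    · rw [List.filter_cons_of_pos hp, PySem.Set.ofList_cons, PySem.Set.ofList_cons, ih,
        List.filter_cons_of_pos hp]
      simp [PySem.Set.discard, List.filter_filter, Bool.and_comm]
    · rw [List.filter_cons_of_neg hp, ih, PySem.Set.ofList_cons,
        List.filter_cons_of_neg hp]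
      simp only [PySem.Set.discard, List.filter_filter]
      refine (List.filter_congr (fun y _ => ?_)).symm
      by_cases hy : y = x
      · subst hy; simp [hp]
      · simp [hy]

theorem flatMap_congr_mem {α β : Type} (l : List α) (f g : α → List β)
    (h : ∀ x ∈ l, f x = g x) : l.flatMap f = l.flatMap g := by
  induction l with
  | nil => rfl
  | cons x xs ih =>
    simp only [List.flatMap_cons, h x List.mem_cons_self]
    rw [ih (fun y hy => h y (List.mem_cons_of_mem _ hy))]

theorem bagIntersectLoop_eq_bagSpec (L R : List (List (String × Int))) :
    bagIntersectLoop L R = bagSpec L R := by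
  induction L, R using bagIntersectLoop.induct with
  | case1 R => simp [bagIntersectLoop, bagSpec, PySem.Set.ofList_nil]
  | case2 rec tl R ih =>
    rw [List.unattach_filter (g := fun r => decide (r ≠ rec)) (hf := fun x h => rfl), List.unattach_attach] at ih
    rw [bagIntersectLoop, ih]
    unfold bagSpec
    rw [PySem.Set.ofList_cons, List.flatMap_cons]
    congr 1
    have hfd : PySem.Set.ofList (tl.filter (fun r => r ≠ rec))
        = PySem.Set.discard (PySem.Set.ofList tl) rec := by
      rw [PySem.Set.discard, ← ofList_filter]
      congr 1
      exact List.filter_congr (fun y _ => by by_cases hy : y = rec <;> simp [hy])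
    rw [hfd]
    refine flatMap_congr_mem _ _ _ (fun k hk => ?_)
    have hkne : k ≠ rec := by
      have := (PySem.Set.mem_discard (s := PySem.Set.ofList tl) (x := rec) (y := k)).mp hk
      exact this.2
    have hcnt : (tl.filter (fun r => r ≠ rec)).count k = (rec :: tl).count k := by
      simp [List.count_filter, hkne, Ne.symm hkne]
    rw [hcnt]

-- ===== VERDICT (by name: the statement is the Claim_ definition above) =====
theorem bag_intersect_spec : Claim_equal_bag_intersect := by
  intro L R _
  unfold Spec_bag_intersect bag_intersect_alt
  rw [bag_intersect_eq_bagSpec, bagIntersectLoop_eq_bagSpec]
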